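-- pv_equiv track=rewrite | github.com/abtkod/practice | interview/CtCI/Chapter 17/1718ShortestSupersequence.py | shortest_supersequence
-- ===== SOURCE A (Python) =====
-- def shortest_supersequence(short, long):
-- 	track = {v:-len(long) for v in short}
-- 	shortest, res = len(long), (0, len(long))
-- 	minv = None
-- 	for i, v in enumerate(long):
-- 		if v in track.keys():
-- 			prev = track[v]
-- 			track[v] = i
-- 			if prev == minv or minv is None:
-- 				indices = track.values()
-- 				minix, maxix = min(indices), i
-- 				if maxix - minix < shortest:
-- 					shortest = maxix - minix
-- 					res = (minix, maxix)
-- 	return res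
-- ===== SOURCE B (Python) =====
-- def shortest_supersequence(short, long):
-- 	# Classic minimum-window two-pointer: counts of window contents + a left
-- 	# pointer shrunk greedily, instead of A's per-hit rescan of last positions.
-- 	need = set(short)
-- 	if not need:
-- 		return (0, len(long))
-- 	missing = len(need)
-- 	cnt = {}
-- 	width, best = len(long), (0, len(long))
-- 	left = 0
-- 	for right, v in enumerate(long):
-- 		if v in need:
-- 			c = cnt.get(v, 0)
-- 			cnt[v] = c + 1
-- 			if c == 0:
-- 				missing -= 1
-- 		if missing == 0:
-- 			while long[left] not in need or cnt[long[left]] > 1: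
-- 				if long[left] in need:
-- 					cnt[long[left]] -= 1
-- 				left += 1
-- 			if right - left < width:
-- 				width, best = right - left, (left, right)
-- 	return best
-- ===== Notes on version B (the rewrite author's own statement) =====
-- stated objective: faster
-- what changed: A rescans all k tracked last-occurrence positions with min(track.values()) at every occurrence of a needed value (its incremental-minimum guard is dead code); B is the classic minimum-window two-pointer algorithm: it keeps multiplicity counts of window contents plus a missing counter and shrinks a left pointer greedily, never storing last positions or computing a minimum at all.
import Mathlib
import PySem

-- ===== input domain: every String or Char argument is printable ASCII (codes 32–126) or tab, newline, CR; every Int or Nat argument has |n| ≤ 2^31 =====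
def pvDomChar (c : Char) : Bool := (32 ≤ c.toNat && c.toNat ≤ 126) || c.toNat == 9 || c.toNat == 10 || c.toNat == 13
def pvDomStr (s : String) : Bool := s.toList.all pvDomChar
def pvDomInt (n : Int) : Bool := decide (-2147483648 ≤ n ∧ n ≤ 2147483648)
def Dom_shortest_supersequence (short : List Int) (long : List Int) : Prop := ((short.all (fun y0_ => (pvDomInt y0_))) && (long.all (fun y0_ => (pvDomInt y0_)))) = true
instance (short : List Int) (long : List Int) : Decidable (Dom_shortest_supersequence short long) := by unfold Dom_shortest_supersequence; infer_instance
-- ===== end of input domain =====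

-- B replaces A's per-occurrence rescan of all tracked last positions by the classic
-- minimum-window two-pointer algorithm (window counts + greedy left pointer); objective: faster (asymptotic, measured).

-- ===== PORT A =====
-- loop body of A's `for i, v in enumerate(long)` (minv is A's outer variable, never reassigned)
def pvStepA (minv : Option Int) (st : PySem.Dict Int Int × Int × (Int × Int)) (iv : Int × Int) :
    PySem.Dict Int Int × Int × (Int × Int) :=
  let track := st.1
  let shortest := st.2.1
  let res := st.2.2
  let i := iv.1
  let v := iv.2
  if track.contains v then
    let prev := track.getD v 0
    let track := track.insert v i
    if some prev == minv || minv.isNone then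
      let indices := track.values
      let minix := (PySem.List.min? indices (fun x => x)).getD 0
      let maxix := i
      if maxix - minix < shortest then (track, maxix - minix, (minix, maxix))
      else (track, shortest, res)
    else (track, shortest, res)
  else st

def shortest_supersequence (short : List Int) (long : List Int) : List Int :=
  let track : PySem.Dict Int Int :=
    short.foldl (fun d v => d.insert v (-(long.length : Int))) PySem.Dict.empty
  let shortest : Int := (long.length : Int)
  let res : Int × Int := (0, (long.length : Int))
  let minv : Option Int := none
  let st := (PySem.List.enumerate long).foldl (pvStepA minv) (track, shortest, res)
  [st.2.2.1, st.2.2.2]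

-- ===== PORT B =====
-- B's `while long[left] not in need or cnt[long[left]] > 1` shrink loop; the fuel argument is
-- only an upper bound on the number of trips (len(long) always suffices on the reachable states);
-- the indexings use getD where Python's are guaranteed in range / present by the loop's invariant.
def pvShrink (need : PySem.Set Int) (long : List Int) :
    Nat → PySem.Dict Int Int → Int → PySem.Dict Int Int × Int
  | 0, cnt, left => (cnt, left)
  | fuel + 1, cnt, left =>
      let u := (PySem.List.pyGet? long left).getD 0
      if !(PySem.Set.contains need u) || decide (1 < cnt.getD u 0) then
        let cnt' := if PySem.Set.contains need u then cnt.insert u (cnt.getD u 0 - 1) else cnt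
        pvShrink need long fuel cnt' (left + 1)
      else (cnt, left)

-- loop body of B's `for right, v in enumerate(long)`
def pvStepB (need : PySem.Set Int) (long : List Int)
    (st : Int × PySem.Dict Int Int × Int × Int × (Int × Int)) (iv : Int × Int) :
    Int × PySem.Dict Int Int × Int × Int × (Int × Int) :=
  let missing := st.1
  let cnt := st.2.1
  let left := st.2.2.1
  let width := st.2.2.2.1
  let best := st.2.2.2.2
  let i := iv.1
  let v := iv.2
  let mc : Int × PySem.Dict Int Int :=
    if PySem.Set.contains need v then
      let c := cnt.getD v 0
      ((if c == 0 then missing - 1 else missing), cnt.insert v (c + 1))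
    else (missing, cnt)
  let missing := mc.1
  let cnt := mc.2
  if missing == 0 then
    let sh := pvShrink need long long.length cnt left
    let cnt := sh.1
    let left := sh.2
    if i - left < width then (missing, cnt, left, i - left, (left, i))
    else (missing, cnt, left, width, best)
  else (missing, cnt, left, width, best)

def shortest_supersequence_alt (short : List Int) (long : List Int) : List Int :=
  let need : PySem.Set Int := PySem.Set.ofList short
  let n : Int := (long.length : Int)
  if need.isEmpty then [0, n]
  else
    let st := (PySem.List.enumerate long).foldl (pvStepB need long)
      ((need.length : Int), PySem.Dict.empty, (0 : Int), n, ((0 : Int), n))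
    [st.2.2.2.2.1, st.2.2.2.2.2]

-- ===== PRECONDITION & SPEC =====
def Spec_shortest_supersequence (short : List Int) (long : List Int) (out : List Int) : Prop := out = shortest_supersequence_alt short long
instance (short : List Int) (long : List Int) (out : List Int) : Decidable (Spec_shortest_supersequence short long out) := by unfold Spec_shortest_supersequence; infer_instance

-- ===== CLAIM (what is proved, stated in full; the proofs are below) =====
def Claim_equal_shortest_supersequence : Prop := ∀ (short : List Int) (long : List Int), Dom_shortest_supersequence short long → Spec_shortest_supersequence short long (shortest_supersequence short long)

-- ===== LEMMAS AND PROOFS =====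

-- index of the LAST occurrence of v in a list
def pvLastIdx (v : Int) : List Int → Option Nat
  | [] => none
  | x :: xs =>
      match pvLastIdx v xs with
      | some j => some (j + 1)
      | none => if x = v then some 0 else none

-- A's tracked value for v after prefix pre: last index, or the -len(long) sentinel
def pvLast (n : Int) (pre : List Int) (v : Int) : Int :=
  match pvLastIdx v pre with
  | some j => (j : Int)
  | none => -n

lemma pvLastIdx_append_singleton (v x : Int) (l : List Int) :
    pvLastIdx v (l ++ [x]) = if x = v then some l.length else pvLastIdx v l := by
  induction l with
  | nil => by_cases h : x = v <;> simp [pvLastIdx, h]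
  | cons y ys ih =>
      by_cases h : x = v
      · simp only [h, if_true] at ih ⊢
        simp [pvLastIdx, ih]
      · simp only [h, if_false] at ih ⊢
        simp only [List.cons_append, pvLastIdx, ih]

lemma pvLastIdx_eq_none_iff (v : Int) (l : List Int) : pvLastIdx v l = none ↔ v ∉ l := by
  induction l with
  | nil => simp [pvLastIdx]
  | cons x xs ih =>
      simp only [pvLastIdx]
      cases h : pvLastIdx v xs with
      | some j =>
          rw [h] at ih
          constructor
          · intro hc; simp at hc
          · intro hc
            exfalso
            apply hc
            apply List.mem_cons_of_mem
            by_contra hm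
            rw [← ih] at hm
            simp at hm
      | none =>
          rw [h] at ih
          by_cases hx : x = v
          · subst hx
            simp [List.mem_cons]
          · show (if x = v then some (0 : Nat) else none) = none ↔ v ∉ x :: xs
            rw [if_neg hx]
            exact ⟨fun _ hc => (List.mem_cons.1 hc).elim (fun h1 => hx h1.symm) (ih.1 rfl),
              fun _ => rfl⟩

lemma pvLastIdx_getElem (v : Int) (l : List Int) (j : Nat) (h : pvLastIdx v l = some j) :
    j < l.length ∧ l[j]? = some v := by
  induction l generalizing j with
  | nil => simp [pvLastIdx] at h
  | cons x xs ih =>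
      simp only [pvLastIdx] at h
      cases h' : pvLastIdx v xs with
      | some j' =>
          rw [h'] at h
          obtain ⟨h1, h2⟩ := ih j' h'
          have : j = j' + 1 := by simpa using h.symm
          subst this
          simp only [List.length_cons, List.getElem?_cons_succ]
          exact ⟨by omega, h2⟩
      | none =>
          rw [h'] at h
          by_cases hx : x = v
          · rw [if_pos hx] at h
            have : j = 0 := by simpa using h.symm
            subst this
            simp [hx]
          · rw [if_neg hx] at h; simp at h

lemma pvLastIdx_after (v : Int) (l : List Int) (j : Nat) (h : pvLastIdx v l = some j) :
    (l.drop (j + 1)).count v = 0 := by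
  induction l generalizing j with
  | nil => simp [pvLastIdx] at h
  | cons x xs ih =>
      simp only [pvLastIdx] at h
      cases h' : pvLastIdx v xs with
      | some j' =>
          rw [h'] at h
          have : j = j' + 1 := by simpa using h.symm
          subst this
          simpa using ih j' h'
      | none =>
          rw [h'] at h
          by_cases hx : x = v
          · rw [if_pos hx] at h
            have : j = 0 := by simpa using h.symm
            subst this
            have hnm : v ∉ xs := (pvLastIdx_eq_none_iff v xs).1 h'
            simpa using List.count_eq_zero.2 hnm
          · rw [if_neg hx] at h; simp at h

lemma pvCount_drop_last (v : Int) (l : List Int) (j : Nat) (h : pvLastIdx v l = some j) :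
    (l.drop j).count v = 1 := by
  obtain ⟨hlt, hget⟩ := pvLastIdx_getElem v l j h
  have hd : l.drop j = l[j] :: l.drop (j + 1) := List.drop_eq_getElem_cons hlt
  have hx : l[j] = v := by
    have := hget
    rw [List.getElem?_eq_getElem hlt] at this
    simpa using this
  rw [hd, hx, List.count_cons_self, pvLastIdx_after v l j h]

lemma pvCount_drop_pos (v : Int) (l : List Int) (j k : Nat) (h : pvLastIdx v l = some j)
    (hk : k ≤ j) : 1 ≤ (l.drop k).count v := by
  obtain ⟨hlt, hget⟩ := pvLastIdx_getElem v l j h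
  have hmem : v ∈ l.drop k := by
    have : l[j]? = some v := hget
    have hj : (l.drop k)[j - k]? = some v := by
      rw [List.getElem?_drop]
      rwa [Nat.add_sub_cancel' hk]
    exact List.mem_of_getElem? hj
  exact List.count_pos_iff.2 hmem

lemma pvCount_drop_zero (v : Int) (l : List Int) (j k : Nat) (h : pvLastIdx v l = some j)
    (hk : j < k) : (l.drop k).count v = 0 := by
  have h1 := pvLastIdx_after v l j h
  have : l.drop k = (l.drop (j + 1)).drop (k - (j + 1)) := by
    rw [List.drop_drop]
    congr 1
    omega
  rw [this]
  have hnm : v ∉ l.drop (j + 1) := List.count_eq_zero.1 h1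
  exact List.count_eq_zero.2 (fun hc => hnm (List.mem_of_mem_drop hc))

lemma pvMem_drop_le_lastIdx (v : Int) (l : List Int) (k : Nat) (h : v ∈ l.drop k) :
    ∃ j, pvLastIdx v l = some j ∧ k ≤ j := by
  have hmem : v ∈ l := List.mem_of_mem_drop h
  cases hj : pvLastIdx v l with
  | none => exact absurd hmem ((pvLastIdx_eq_none_iff v l).1 hj)
  | some j =>
      refine ⟨j, rfl, ?_⟩
      by_contra hc
      have := pvCount_drop_zero v l j k hj (by omega)
      exact absurd (List.count_pos_iff.2 h) (by omega)

lemma pvSize (d : PySem.Dict Int Int) : d.size = d.keys.length := by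
  simp [PySem.Dict.size, PySem.Dict.keys]

lemma pvLenLe (l1 l2 : List Int) (h1 : l1.Nodup) (hs : ∀ x ∈ l1, x ∈ l2) :
    l1.length ≤ l2.length := by
  have hsub : l1.toFinset ⊆ l2.toFinset := by
    intro a ha; rw [List.mem_toFinset] at *; exact hs a ha
  have hc := Finset.card_le_card hsub
  rw [List.toFinset_card_of_nodup h1] at hc
  exact hc.trans (List.toFinset_card_le l2)

lemma pvCompleteMem (keys need : List Int) (hk : keys.Nodup) (hn : need.Nodup)
    (hsub : ∀ u ∈ keys, u ∈ need) (hlen : need.length ≤ keys.length) :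
    ∀ u ∈ need, u ∈ keys := by
  intro u hu
  have h1 : keys.toFinset ⊆ need.toFinset := by
    intro a ha; rw [List.mem_toFinset] at *; exact hsub a ha
  have h2 : need.toFinset.card ≤ keys.toFinset.card := by
    rw [List.toFinset_card_of_nodup hk, List.toFinset_card_of_nodup hn]; exact hlen
  have heq := Finset.eq_of_subset_of_card_le h1 h2
  rw [← List.mem_toFinset, ← heq, List.mem_toFinset] at hu
  exact hu

-- min(l) = m when m is a member and a lower bound
lemma pvMinGetD (l : List Int) (m : Int) (hm : m ∈ l) (hlb : ∀ x ∈ l, m ≤ x) :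
    (PySem.List.min? l (fun x => x)).getD 0 = m := by
  cases h : PySem.List.min? l (fun x => x) with
  | none =>
      rw [PySem.List.min?_eq_none_iff] at h
      subst h; simp at hm
  | some z =>
      have hz := PySem.List.min?_mem h
      have hzm : ∀ y ∈ l, z ≤ y := by simpa using PySem.List.min?_isMin h
      have : z = m := le_antisymm (hzm m hm) (hlb z hz)
      simp [this]

-- membership in a dict's value list, for nodup keys
lemma pvValWitness (d : PySem.Dict Int Int) (hnd : d.keys.Nodup) (m : Int) :
    m ∈ d.values ↔ ∃ u, d.get? u = some m := by
  constructor
  · intro hm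
    rw [PySem.Dict.values_eq_map_keys d hnd 0] at hm
    obtain ⟨u, hu, he⟩ := List.mem_map.1 hm
    refine ⟨u, ?_⟩
    cases hg : d.get? u with
    | none =>
        rw [PySem.Dict.get?_eq_none_iff_not_mem_keys] at hg
        exact absurd hu hg
    | some w =>
        have hw : d.getD u 0 = w := by rw [PySem.Dict.getD_eq_get?_getD, hg]; rfl
        have he' : w = m := by rw [← hw]; exact he
        rw [he']
  · intro ⟨u, hu⟩
    have hit := PySem.Dict.mem_items_of_get?_eq_some d hu
    have hmm : m ∈ d.items.map (·.2) := List.mem_map.2 ⟨(u, m), hit, rfl⟩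
    simpa [PySem.Dict.values] using hmm

lemma pvGetFoldlInsertConst (l : List Int) (c : Int) :
    ∀ (d : PySem.Dict Int Int) (v : Int),
      (l.foldl (fun d x => d.insert x c) d).get? v = if v ∈ l then some c else d.get? v := by
  induction l with
  | nil => intro d v; simp
  | cons x l ih =>
      intro d v
      simp only [List.foldl_cons]
      rw [ih]
      by_cases hvx : v = x
      · subst hvx
        by_cases hvl : v ∈ l
        · simp [hvl]
        · simp [hvl]
      · by_cases hvl : v ∈ l
        · simp [hvl, hvx]
        · simp [hvl, hvx, PySem.Dict.get?_insert]

-- the joint loop invariant, over the processed prefix pre of long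
def pvInv (need : List Int) (long pre : List Int)
    (stA : PySem.Dict Int Int × Int × (Int × Int))
    (stB : Int × PySem.Dict Int Int × Int × Int × (Int × Int)) : Prop :=
  stA.2.1 = stB.2.2.2.1 ∧ stA.2.2 = stB.2.2.2.2 ∧ stA.2.1 ≤ (long.length : Int) ∧
  stA.1.keys = need ∧
  (∀ v ∈ need, stA.1.get? v = some (pvLast (long.length : Int) pre v)) ∧
  (∃ k : Nat, stB.2.2.1 = (k : Int) ∧ k ≤ pre.length ∧
    stB.2.1.keys.Nodup ∧ (∀ u ∈ stB.2.1.keys, u ∈ need) ∧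
    (∀ v ∈ need,
      (∃ c : Nat, stB.2.1.get? v = some (c : Int) ∧ c = (pre.drop k).count v ∧ 1 ≤ c) ∨
      (stB.2.1.get? v = none ∧ (pre.drop k).count v = 0)) ∧
    stB.1 = (need.length : Int) - (stB.2.1.size : Int) ∧
    (stB.1 ≠ 0 → k = 0) ∧
    (stB.1 = 0 →
      (∀ v ∈ need, ∃ j : Nat, pvLastIdx v pre = some j ∧ k ≤ j) ∧
      (∃ u ∈ need, pvLastIdx u pre = some k) ∧
      stB.2.2.2.1 ≤ (pre.length : Int) - 1 - (k : Int)))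

lemma pvExistsMinLast (need : List Int) (pre : List Int) (hne : need ≠ [])
    (h : ∀ v ∈ need, ∃ j : Nat, pvLastIdx v pre = some j) :
    ∃ u ∈ need, ∃ m : Nat, pvLastIdx u pre = some m ∧
      ∀ v ∈ need, ∀ j : Nat, pvLastIdx v pre = some j → m ≤ j := by
  induction need with
  | nil => exact absurd rfl hne
  | cons y ys ih =>
      obtain ⟨jy, hjy⟩ := h y List.mem_cons_self
      by_cases hys : ys = []
      · subst hys
        refine ⟨y, List.mem_cons_self, jy, hjy, ?_⟩
        intro v hv j hj
        rcases List.mem_cons.1 hv with h1 | h1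
        · subst h1
          rw [hjy] at hj
          exact le_of_eq (Option.some_inj.1 hj)
        · simp at h1
      · obtain ⟨u, hu, m, hm, hmin⟩ := ih hys (fun v hv => h v (List.mem_cons_of_mem y hv))
        by_cases hcmp : m ≤ jy
        · refine ⟨u, List.mem_cons_of_mem y hu, m, hm, ?_⟩
          intro v hv j hj
          rcases List.mem_cons.1 hv with h1 | h1
          · subst h1
            rw [hjy] at hj
            have := Option.some_inj.1 hj
            omega
          · exact hmin v h1 j hj
        · refine ⟨y, List.mem_cons_self, jy, hjy, ?_⟩
          intro v hv j hj
          rcases List.mem_cons.1 hv with h1 | h1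
          · subst h1
            rw [hjy] at hj
            exact le_of_eq (Option.some_inj.1 hj)
          · have := hmin v h1 j hj; omega

-- the shrink loop lands exactly on m, the minimal last-occurrence index, keeping counts exact
lemma pvShrink_spec (need : PySem.Set Int) (long pre : List Int)
    (hpre : ∀ t : Nat, t < pre.length → long[t]? = pre[t]?)
    (m : Nat)
    (hmin : ∀ v ∈ need, ∀ j : Nat, pvLastIdx v pre = some j → m ≤ j)
    (hwit : ∃ u ∈ need, pvLastIdx u pre = some m) :
    ∀ (fuel : Nat) (cnt : PySem.Dict Int Int) (k : Nat),
      k ≤ m → m - k < fuel →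
      cnt.keys.Nodup → (∀ u ∈ cnt.keys, u ∈ need) →
      (∀ v ∈ need, ∃ c : Nat, cnt.get? v = some (c : Int) ∧ c = (pre.drop k).count v ∧ 1 ≤ c) →
      ∃ cnt' : PySem.Dict Int Int,
        pvShrink need long fuel cnt (k : Int) = (cnt', (m : Int)) ∧
        cnt'.keys = cnt.keys ∧
        (∀ v ∈ need, ∃ c : Nat, cnt'.get? v = some (c : Int) ∧ c = (pre.drop m).count v ∧ 1 ≤ c) := by
  obtain ⟨um, hum, humLast⟩ := hwit
  have hmlt : m < pre.length := (pvLastIdx_getElem um pre m humLast).1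
  intro fuel
  induction fuel with
  | zero => intro cnt k hkm hfuel; omega
  | succ fuel ih =>
      intro cnt k hkm hfuel hnd hsub hcnt
      have hklt : k < pre.length := by omega
      have hgetk : long[k]? = pre[k]? := hpre k hklt
      have hu : (PySem.List.pyGet? long (k : Int)).getD 0 = pre[k] := by
        rw [PySem.List.pyGet?_natCast, hgetk, List.getElem?_eq_getElem hklt]
        rfl
      by_cases hkem : k = m
      · -- at the minimal last occurrence: its count is 1, the loop stops
        subst hkem
        have hpk : pre[k] = um := by
          have := (pvLastIdx_getElem um pre k humLast).2
          rw [List.getElem?_eq_getElem hklt] at this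
          exact Option.some_inj.1 this
        obtain ⟨c, hc, hcc, hc1⟩ := hcnt um hum
        have hcm : c = 1 := by rw [hcc, pvCount_drop_last um pre k humLast]
        have hcontains : PySem.Set.contains need pre[k] = true := by
          rw [hpk]; exact (PySem.Set.contains_iff need um).2 hum
        have hgd : cnt.getD pre[k] 0 = (1 : Int) := by
          rw [hpk, PySem.Dict.getD_eq_get?_getD, hc, hcm]; rfl
        refine ⟨cnt, ?_, rfl, ?_⟩
        · simp only [pvShrink, hu, hgd, hcontains]
          norm_num
        · intro v hv; exact hcnt v hv
      · -- strictly left of m: the head is dropped (either unneeded, or its count is ≥ 2)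
        have hklt' : k < m := by omega
        have hconsk : pre.drop k = pre[k] :: pre.drop (k + 1) := List.drop_eq_getElem_cons hklt
        by_cases hmem : pre[k] ∈ need
        · obtain ⟨c, hc, hcc, hc1⟩ := hcnt pre[k] hmem
          have hmemd : pre[k] ∈ pre.drop k := by rw [hconsk]; exact List.mem_cons_self
          obtain ⟨j, hj, hkj⟩ := pvMem_drop_le_lastIdx pre[k] pre k hmemd
          have hmj : m ≤ j := hmin pre[k] hmem j hj
          have hcsplit : (pre.drop k).count pre[k] = 1 + (pre.drop (k + 1)).count pre[k] := by
            rw [hconsk, List.count_cons_self]; omega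
          have hpos : 1 ≤ (pre.drop (k + 1)).count pre[k] :=
            pvCount_drop_pos pre[k] pre j (k + 1) hj (by omega)
          have hc2 : 2 ≤ c := by omega
          have hcontains : PySem.Set.contains need pre[k] = true :=
            (PySem.Set.contains_iff need pre[k]).2 hmem
          have hgd : cnt.getD pre[k] 0 = (c : Int) := by
            rw [PySem.Dict.getD_eq_get?_getD, hc]; rfl
          have hck : cnt.contains pre[k] = true := by
            rw [PySem.Dict.contains_iff_mem_keys]
            by_contra hcon
            rw [← PySem.Dict.get?_eq_none_iff_not_mem_keys] at hcon
            rw [hc] at hcon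
            simp at hcon
          have hcond : (!PySem.Set.contains need pre[k] || decide (1 < cnt.getD pre[k] 0)) = true := by
            rw [hgd]
            simp only [Bool.or_eq_true, decide_eq_true_eq]
            right
            exact_mod_cast hc2
          have hstep : pvShrink need long (fuel + 1) cnt (k : Int) =
              pvShrink need long fuel (cnt.insert pre[k] (cnt.getD pre[k] 0 - 1)) ((k : Int) + 1) := by
            simp only [pvShrink]
            rw [hu, hcond, hcontains]
            simp
          have hcast : ((k : Int) + 1) = ((k + 1 : Nat) : Int) := by push_cast; ring
          have hih := ih (cnt.insert pre[k] (cnt.getD pre[k] 0 - 1)) (k + 1)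
            (by omega) (by omega)
            (PySem.Dict.nodup_keys_insert cnt pre[k] _ hnd)
            (by
              intro u hu'
              rcases (PySem.Dict.mem_keys_insert cnt pre[k] u _).1 hu' with h | h
              · exact h ▸ hmem
              · exact hsub u h)
            (by
              intro v hv
              by_cases hveq : v = pre[k]
              · subst hveq
                refine ⟨c - 1, ?_, ?_, by omega⟩
                · rw [PySem.Dict.get?_insert, if_pos rfl, hgd]
                  congr 1
                  omega
                · omega
              · obtain ⟨cv, hcv, hcvc, hcv1⟩ := hcnt v hv
                refine ⟨cv, ?_, ?_, hcv1⟩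
                · rw [PySem.Dict.get?_insert, if_neg hveq]; exact hcv
                · rw [hcvc, hconsk, List.count_cons]
                  simp [Ne.symm hveq])
          obtain ⟨cnt', heq, hkeys, hcnt'⟩ := hih
          refine ⟨cnt', ?_, ?_, hcnt'⟩
          · rw [hstep, hcast, heq]
          · rw [hkeys, PySem.Dict.keys_insert_of_contains cnt _ hck]
        · -- unneeded head: counts untouched
          have hcontains : PySem.Set.contains need pre[k] = false := by
            rw [← Bool.not_eq_true, PySem.Set.contains_iff]; exact hmem
          have hcond : (!PySem.Set.contains need pre[k] || decide (1 < cnt.getD pre[k] 0)) = true := by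
            rw [hcontains]; simp
          have hstep : pvShrink need long (fuel + 1) cnt (k : Int) =
              pvShrink need long fuel cnt ((k : Int) + 1) := by
            simp only [pvShrink]
            rw [hu, hcond, hcontains]
            simp
          have hcast : ((k : Int) + 1) = ((k + 1 : Nat) : Int) := by push_cast; ring
          have hih := ih cnt (k + 1) (by omega) (by omega) hnd hsub
            (by
              intro v hv
              obtain ⟨cv, hcv, hcvc, hcv1⟩ := hcnt v hv
              have hvne : v ≠ pre[k] := fun hh => hmem (hh ▸ hv)
              exact ⟨cv, hcv, by rw [hcvc, hconsk, List.count_cons]; simp [Ne.symm hvne], hcv1⟩)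
          obtain ⟨cnt', heq, hkeys, hcnt'⟩ := hih
          exact ⟨cnt', by rw [hstep, hcast, heq], hkeys, hcnt'⟩

lemma pvPrefixGet (p r : List Int) (t : Nat) (ht : t < p.length) : (p ++ r)[t]? = p[t]? :=
  List.getElem?_append_left ht

lemma pvCountAppend (u v : Int) (l : List Int) (k : Nat) (hk : k ≤ l.length) :
    ((l ++ [v]).drop k).count u = (l.drop k).count u + (if v = u then 1 else 0) := by
  rw [List.drop_append_of_le_length hk, List.count_append]
  by_cases h : v = u <;> simp [h]

lemma pvLastAppend (u v : Int) (l : List Int) (hne : v ≠ u) :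
    pvLastIdx u (l ++ [v]) = pvLastIdx u l := by
  rw [pvLastIdx_append_singleton, if_neg hne]

-- one joint step: A's loop body and B's loop body preserve the invariant
lemma pvStep_inv (need : PySem.Set Int) (hnd : need.Nodup) (hne : need ≠ [])
    (long pre rest : List Int) (v : Int) (hlong : long = pre ++ v :: rest)
    (stA : PySem.Dict Int Int × Int × (Int × Int))
    (stB : Int × PySem.Dict Int Int × Int × Int × (Int × Int))
    (hInv : pvInv need long pre stA stB) :
    pvInv need long (pre ++ [v]) (pvStepA none stA ((pre.length : Int), v))
      (pvStepB need long stB ((pre.length : Int), v)) := by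
  obtain ⟨track, shortest, res⟩ := stA
  obtain ⟨missing, cnt, left, width, best⟩ := stB
  obtain ⟨h1, h2, h3, hkeys, htrack, k, hleft, hkpre, hndB, hsubB, hcnt, hmiss, hm0, hmfull⟩ := hInv
  simp only at h1 h2 h3 hkeys htrack hleft hkpre hndB hsubB hcnt hmiss hm0 hmfull
  have hslt : pre.length < long.length := by
    subst hlong; simp
  have hpre' : ∀ t : Nat, t < (pre ++ [v]).length → long[t]? = (pre ++ [v])[t]? := by
    intro t ht
    have : long = (pre ++ [v]) ++ rest := by subst hlong; simp
    rw [this]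
    exact pvPrefixGet _ _ t ht
  have hlenpre' : (pre ++ [v]).length = pre.length + 1 := by simp
  have hndA : track.keys.Nodup := hkeys ▸ hnd
  by_cases hv : v ∈ need
  · -- needed value arrives: A re-tracks and rescans, B counts it in and maybe shrinks
    have hca : track.contains v = true := by
      rw [PySem.Dict.contains_iff_mem_keys, hkeys]; exact hv
    have hcb : PySem.Set.contains need v = true := (PySem.Set.contains_iff need v).2 hv
    -- B's count of v before the step
    have hgdv : cnt.getD v 0 = (((pre.drop k).count v : Nat) : Int) := by
      rcases hcnt v hv with ⟨c, hc, hcc, _⟩ | ⟨hc, hcc⟩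
      · rw [PySem.Dict.getD_eq_get?_getD, hc, hcc]; rfl
      · rw [PySem.Dict.getD_eq_get?_getD, hc, hcc]; rfl
    set cN : Nat := (pre.drop k).count v with hcN
    -- A's updated track over pre' := pre ++ [v]
    have htrack' : ∀ u ∈ need, (track.insert v (pre.length : Int)).get? u =
        some (pvLast (long.length : Int) (pre ++ [v]) u) := by
      intro u hu
      by_cases huv : u = v
      · subst huv
        rw [PySem.Dict.get?_insert, if_pos rfl]
        unfold pvLast
        rw [pvLastIdx_append_singleton, if_pos rfl]
      · rw [PySem.Dict.get?_insert, if_neg huv]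
        rw [htrack u hu]
        unfold pvLast
        rw [pvLastAppend u v pre (fun h => huv h.symm)]
    have hkeys' : (track.insert v (pre.length : Int)).keys = need := by
      rw [PySem.Dict.keys_insert_of_contains track _ hca]; exact hkeys
    have hndA' : (track.insert v (pre.length : Int)).keys.Nodup := hkeys' ▸ hnd
    -- B's updated counter
    set cnt' := cnt.insert v ((cN : Int) + 1) with hcnt'def
    have hndB' : cnt'.keys.Nodup := PySem.Dict.nodup_keys_insert cnt v _ hndB
    have hsubB' : ∀ u ∈ cnt'.keys, u ∈ need := by
      intro u hu
      rcases (PySem.Dict.mem_keys_insert cnt v u _).1 hu with h | h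
      · exact h ▸ hv
      · exact hsubB u h
    have hcnt'' : ∀ u ∈ need,
        (∃ c : Nat, cnt'.get? u = some (c : Int) ∧ c = ((pre ++ [v]).drop k).count u ∧ 1 ≤ c) ∨
        (cnt'.get? u = none ∧ ((pre ++ [v]).drop k).count u = 0) := by
      intro u hu
      by_cases huv : u = v
      · subst huv
        left
        refine ⟨cN + 1, ?_, ?_, by omega⟩
        · rw [hcnt'def, PySem.Dict.get?_insert, if_pos rfl]; push_cast; ring_nf
        · rw [pvCountAppend u u pre k hkpre, if_pos rfl]
      · rw [hcnt'def]
        have hcntu : ((pre ++ [v]).drop k).count u = (pre.drop k).count u := by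
          rw [pvCountAppend u v pre k hkpre, if_neg (fun h => huv h.symm)]; ring
        rcases hcnt u hu with ⟨c, hc, hcc, hc1⟩ | ⟨hc, hcc⟩
        · exact Or.inl ⟨c, by rw [PySem.Dict.get?_insert, if_neg huv]; exact hc, by omega, hc1⟩
        · exact Or.inr ⟨by rw [PySem.Dict.get?_insert, if_neg huv]; exact hc, by omega⟩
    -- size bookkeeping: missing' = |need| - size'
    have hcontv : cnt.contains v = (cN != 0) := by
      rcases hcnt v hv with ⟨c, hc, hcc, hc1⟩ | ⟨hc, hcc⟩
      · have : cnt.contains v = true := by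
          rw [PySem.Dict.contains_iff_mem_keys]
          by_contra hcon
          rw [← PySem.Dict.get?_eq_none_iff_not_mem_keys] at hcon
          rw [hc] at hcon; simp at hcon
        rw [this]
        have : cN ≠ 0 := by omega
        simp [this]
      · have : cnt.contains v = false := by
          rw [← Bool.not_eq_true, PySem.Dict.contains_iff_mem_keys,
            ← PySem.Dict.get?_eq_none_iff_not_mem_keys]
          exact hc
        rw [this]
        have : cN = 0 := hcc
        simp [this]
    set missing' : Int := if ((cN : Int) == 0) = true then missing - 1 else missing with hm'def
    have hmiss' : missing' = (need.length : Int) - (cnt'.size : Int) := by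
      have hsz := PySem.Dict.size_insert cnt v ((cN : Int) + 1)
      by_cases hc0 : cN = 0
      · have hcv : cnt.contains v = false := by rw [hcontv, hc0]; rfl
        rw [hcv] at hsz
        simp only [Bool.false_eq_true, if_false] at hsz
        rw [hm'def]
        have : ((cN : Int) == 0) = true := by rw [hc0]; rfl
        rw [if_pos this, hmiss, hcnt'def, hsz]
        push_cast; ring
      · have hcv : cnt.contains v = true := by rw [hcontv]; simp [hc0]
        rw [hcv] at hsz
        simp only [if_true] at hsz
        rw [hm'def]
        have : ((cN : Int) == 0) = false := by
          simp only [beq_eq_false_iff_ne, ne_eq]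
          exact_mod_cast hc0
        rw [this]
        simp only [Bool.false_eq_true, if_false]
        rw [hmiss, hcnt'def, hsz]
    -- evaluate both loop bodies
    simp only [pvStepA, pvStepB, hca, hcb, if_true]
    simp only [Option.isNone_none, Bool.or_true, if_true]
    rw [hgdv] at *
    rw [← hm'def]
    rw [← hcnt'def]
    by_cases hfull : missing' = 0
    · -- window complete after this step
      have hallkeys : ∀ u ∈ need, u ∈ cnt'.keys := by
        apply pvCompleteMem cnt'.keys need hndB' hnd hsubB'
        have := hmiss'
        rw [hfull] at this
        have hsz : (cnt'.size : Int) = (need.length : Int) := by omega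
        rw [pvSize] at hsz
        omega
      have hallcnt : ∀ u ∈ need, ∃ c : Nat, cnt'.get? u = some (c : Int) ∧
          c = ((pre ++ [v]).drop k).count u ∧ 1 ≤ c := by
        intro u hu
        rcases hcnt'' u hu with h | ⟨hnone, _⟩
        · exact h
        · rw [PySem.Dict.get?_eq_none_iff_not_mem_keys] at hnone
          exact absurd (hallkeys u hu) hnone
      have hjex : ∀ u ∈ need, ∃ j : Nat, pvLastIdx u (pre ++ [v]) = some j ∧ k ≤ j := by
        intro u hu
        obtain ⟨c, _, hcc, hc1⟩ := hallcnt u hu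
        have hmem : u ∈ (pre ++ [v]).drop k := by
          apply List.count_pos_iff.1
          omega
        exact pvMem_drop_le_lastIdx u (pre ++ [v]) k hmem
      obtain ⟨um, hum, m, hm, hminAll⟩ :=
        pvExistsMinLast need (pre ++ [v]) hne (fun u hu => ⟨(hjex u hu).choose, (hjex u hu).choose_spec.1⟩)
      have hjexM : ∀ u ∈ need, ∃ j : Nat, pvLastIdx u (pre ++ [v]) = some j ∧ m ≤ j := by
        intro u hu
        obtain ⟨j, hj, _⟩ := hjex u hu
        exact ⟨j, hj, hminAll u hu j hj⟩
      have hkm : k ≤ m := by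
        obtain ⟨j, hj, hkj⟩ := hjex um hum
        rw [hm] at hj
        have := Option.some_inj.1 hj
        omega
      have hmlt : m < (pre ++ [v]).length := (pvLastIdx_getElem um _ m hm).1
      obtain ⟨cnt'', hshr, hkeys'', hcnt''2⟩ :=
        pvShrink_spec need long (pre ++ [v]) hpre' m hminAll ⟨um, hum, hm⟩
          long.length cnt' k hkm (by
            rw [hlenpre'] at hmlt
            omega)
          hndB' hsubB' hallcnt
      -- A's rescan minimum equals m
      have hminA : (PySem.List.min? (track.insert v (pre.length : Int)).values (fun x => x)).getD 0
          = (m : Int) := by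
        apply pvMinGetD
        · rw [pvValWitness _ hndA' _]
          refine ⟨um, ?_⟩
          rw [htrack' um hum]
          unfold pvLast
          rw [hm]
        · intro y hy
          obtain ⟨u, hu⟩ := (pvValWitness _ hndA' y).1 hy
          have humem : u ∈ need := by
            rw [← hkeys']
            by_contra hcon
            rw [← PySem.Dict.get?_eq_none_iff_not_mem_keys] at hcon
            rw [hu] at hcon
            simp at hcon
          rw [htrack' u humem] at hu
          obtain ⟨j, hj, _⟩ := hjex u humem
          have hpv : pvLast (long.length : Int) (pre ++ [v]) u = (j : Int) := by
            unfold pvLast; rw [hj]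
          rw [hpv] at hu
          have := Option.some_inj.1 hu
          have hmj := hminAll u humem j hj
          omega
      -- both compare s - m against the same current width
      have hfull' : ((missing' == 0) = true) := by rw [hfull]; rfl
      rw [← hleft] at hshr
      simp only [hfull', if_true, hshr, hminA, h1]
      by_cases hup : (pre.length : Int) - (m : Int) < width
      · rw [if_pos hup, if_pos hup]
        refine ⟨rfl, rfl, ?_, hkeys', htrack', m, rfl, by omega,
          (by show cnt''.keys.Nodup; rw [hkeys'']; exact hndB'), (by show (∀ u ∈ cnt''.keys, u ∈ need); rw [hkeys'']; exact hsubB'), ?_, ?_, ?_, ?_⟩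
        · show (pre.length : Int) - (m : Int) ≤ (long.length : Int)
          omega
        · intro u hu
          exact Or.inl (hcnt''2 u hu)
        · show missing' = (need.length : Int) - (cnt''.size : Int)
          rw [pvSize, hkeys'', ← pvSize, hmiss']
        · intro hcon; exact absurd hfull hcon
        · intro _
          refine ⟨hjexM, ?_, ?_⟩
          · exact ⟨um, hum, hm⟩
          · show (pre.length : Int) - (m : Int) ≤ ((pre ++ [v]).length : Int) - 1 - (m : Int)
            rw [hlenpre']
            push_cast
            omega
      · rw [if_neg hup, if_neg hup]
        refine ⟨rfl, h2, (by show width ≤ (long.length : Int); omega), hkeys', htrack', m, rfl, by omega,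
          (by show cnt''.keys.Nodup; rw [hkeys'']; exact hndB'), (by show (∀ u ∈ cnt''.keys, u ∈ need); rw [hkeys'']; exact hsubB'), ?_, ?_, ?_, ?_⟩
        · intro u hu
          exact Or.inl (hcnt''2 u hu)
        · show missing' = (need.length : Int) - (cnt''.size : Int)
          rw [pvSize, hkeys'', ← pvSize, hmiss']
        · intro hcon; exact absurd hfull hcon
        · intro _
          refine ⟨hjexM, ⟨um, hum, hm⟩, ?_⟩
          show width ≤ ((pre ++ [v]).length : Int) - 1 - (m : Int)
          rw [hlenpre']
          push_cast
          push_cast at hup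
          omega
    · -- window still incomplete: some needed value is still at its sentinel, A cannot improve
      have hmissne : missing ≠ 0 := by
        intro hmz
        apply hfull
        have hsz : (cnt.size : Int) = (need.length : Int) := by rw [hmiss] at hmz; omega
        have hallk : ∀ u ∈ need, u ∈ cnt.keys := by
          apply pvCompleteMem cnt.keys need hndB hnd hsubB
          rw [pvSize] at hsz
          omega
        have hvk := hallk v hv
        rcases hcnt v hv with ⟨c, hc, hcc, hc1⟩ | ⟨hc, _⟩
        · have hc0 : cN ≠ 0 := by omega
          rw [hm'def]
          have : ((cN : Int) == 0) = false := by
            simp only [beq_eq_false_iff_ne, ne_eq]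
            exact_mod_cast hc0
          rw [this]
          simp only [Bool.false_eq_true, if_false]
          exact hmz
        · rw [PySem.Dict.get?_eq_none_iff_not_mem_keys] at hc
          exact absurd hvk hc
      have hk0 : k = 0 := hm0 hmissne
      -- a needed value missing from the window
      have hszlt : cnt'.size < need.length := by
        have h1' : (cnt'.size : Int) ≤ (need.length : Int) := by
          rw [pvSize]
          exact_mod_cast pvLenLe cnt'.keys need hndB' hsubB'
        have : missing' ≠ 0 := hfull
        rw [hmiss'] at this
        omega
      have hex : ∃ u ∈ need, u ∉ cnt'.keys := by
        by_contra hno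
        simp only [not_exists, not_and, not_not] at hno
        have := pvLenLe need cnt'.keys hnd hno
        rw [← pvSize] at this
        omega
      obtain ⟨u0, hu0, hu0k⟩ := hex
      have hu0none : cnt'.get? u0 = none := by
        rw [PySem.Dict.get?_eq_none_iff_not_mem_keys]; exact hu0k
      have hu0cnt : ((pre ++ [v]).drop k).count u0 = 0 := by
        rcases hcnt'' u0 hu0 with ⟨c, hc, _, _⟩ | ⟨_, hcc⟩
        · rw [hu0none] at hc; simp at hc
        · exact hcc
      have hu0last : pvLastIdx u0 (pre ++ [v]) = none := by
        rw [pvLastIdx_eq_none_iff]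
        intro hmem
        have : u0 ∈ (pre ++ [v]).drop k := by rw [hk0]; simpa using hmem
        have := List.count_pos_iff.2 this
        omega
      have hu0track : (track.insert v (pre.length : Int)).get? u0 = some (-(long.length : Int)) := by
        rw [htrack' u0 hu0]
        unfold pvLast
        rw [hu0last]
      have hminle : (PySem.List.min? (track.insert v (pre.length : Int)).values (fun x => x)).getD 0
          ≤ -(long.length : Int) := by
        have hmemv : (-(long.length : Int)) ∈ (track.insert v (pre.length : Int)).values :=
          (pvValWitness _ hndA' _).2 ⟨u0, hu0track⟩
        cases hq : PySem.List.min? (track.insert v (pre.length : Int)).values (fun x => x) with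
        | none =>
            rw [PySem.List.min?_eq_none_iff] at hq
            rw [hq] at hmemv; simp at hmemv
        | some z =>
            have := PySem.List.min?_isMin hq
            simpa using this _ hmemv
      have hnoup : ¬ ((pre.length : Int) -
          (PySem.List.min? (track.insert v (pre.length : Int)).values (fun x => x)).getD 0 < shortest) := by
        omega
      have hfull' : ((missing' == 0) = true) = False := by
        simp only [beq_iff_eq, eq_iff_iff, iff_false]
        exact hfull
      rw [if_neg hnoup]
      simp only [hfull', if_false]
      refine ⟨h1, h2, h3, hkeys', htrack', k, hleft, by omega, hndB', hsubB', hcnt'', hmiss', ?_, ?_⟩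
      · intro _; exact hk0
      · intro hcon; exact absurd hcon hfull
  · -- unneeded value: A skips; B at most runs a no-move shrink
    have hca : ¬ (track.contains v = true) := by
      rw [PySem.Dict.contains_iff_mem_keys, hkeys]; exact hv
    have hcb : PySem.Set.contains need v = false := by
      rw [← Bool.not_eq_true, PySem.Set.contains_iff]; exact hv
    have htrack2 : ∀ u ∈ need, track.get? u = some (pvLast (long.length : Int) (pre ++ [v]) u) := by
      intro u hu
      rw [htrack u hu]
      unfold pvLast
      rw [pvLastAppend u v pre (fun h => hv (h ▸ hu))]
    have hcnt2 : ∀ u ∈ need,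
        (∃ c : Nat, cnt.get? u = some (c : Int) ∧ c = ((pre ++ [v]).drop k).count u ∧ 1 ≤ c) ∨
        (cnt.get? u = none ∧ ((pre ++ [v]).drop k).count u = 0) := by
      intro u hu
      have hcntu : ((pre ++ [v]).drop k).count u = (pre.drop k).count u := by
        rw [pvCountAppend u v pre k hkpre, if_neg (by intro h; subst h; exact hv hu)]; ring
      rcases hcnt u hu with ⟨c, hc, hcc, hc1⟩ | ⟨hc, hcc⟩
      · exact Or.inl ⟨c, hc, by omega, hc1⟩
      · exact Or.inr ⟨hc, by omega⟩
    simp only [pvStepA, pvStepB, hca, hcb, if_false, Bool.false_eq_true]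
    by_cases hmz : missing = 0
    · -- window already complete: the shrink loop stops immediately at the old left
      obtain ⟨hjex0, ⟨u0, hu0, hu0last⟩, hwidth⟩ := hmfull hmz
      have hjex' : ∀ u ∈ need, ∃ j : Nat, pvLastIdx u (pre ++ [v]) = some j ∧ k ≤ j := by
        intro u hu
        obtain ⟨j, hj, hkj⟩ := hjex0 u hu
        exact ⟨j, by rw [pvLastAppend u v pre (fun h => hv (h ▸ hu))]; exact hj, hkj⟩
      have hminAll : ∀ u ∈ need, ∀ j : Nat, pvLastIdx u (pre ++ [v]) = some j → k ≤ j := by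
        intro u hu j hj
        obtain ⟨j', hj', hkj'⟩ := hjex' u hu
        rw [hj'] at hj
        have := Option.some_inj.1 hj
        omega
      have hu0last' : pvLastIdx u0 (pre ++ [v]) = some k := by
        rw [pvLastAppend u0 v pre (fun h => hv (h ▸ hu0))]; exact hu0last
      have hallcnt : ∀ u ∈ need, ∃ c : Nat, cnt.get? u = some (c : Int) ∧
          c = ((pre ++ [v]).drop k).count u ∧ 1 ≤ c := by
        intro u hu
        rcases hcnt2 u hu with h | ⟨hnone, _⟩
        · exact h
        · exfalso
          have hsz : (cnt.size : Int) = (need.length : Int) := by rw [hmiss] at hmz; omega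
          have hallk : ∀ u' ∈ need, u' ∈ cnt.keys := by
            apply pvCompleteMem cnt.keys need hndB hnd hsubB
            rw [pvSize] at hsz
            omega
          rw [PySem.Dict.get?_eq_none_iff_not_mem_keys] at hnone
          exact absurd (hallk u hu) hnone
      obtain ⟨cnt'', hshr, hkeys'', hcnt''2⟩ :=
        pvShrink_spec need long (pre ++ [v]) hpre' k hminAll ⟨u0, hu0, hu0last'⟩
          long.length cnt k (le_refl k) (by
            have : k < long.length := by
              subst hlong
              simp only [List.length_append, List.length_cons] at *
              omega
            omega)
          hndB hsubB hallcnt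
      have hmz' : ((missing == 0) = true) := by rw [hmz]; rfl
      have hshr' : pvShrink need long long.length cnt left = (cnt'', (k : Int)) := by
        rw [hleft]; exact hshr
      simp only [hmz', if_true, hshr']
      have hnoup : ¬ ((pre.length : Int) - (k : Int) < width) := by
        rw [hlenpre'] at *
        omega
      rw [if_neg hnoup]
      refine ⟨h1, h2, h3, hkeys, htrack2, k, rfl, by omega,
        (by show cnt''.keys.Nodup; rw [hkeys'']; exact hndB), (by show (∀ u ∈ cnt''.keys, u ∈ need); rw [hkeys'']; exact hsubB),
        (fun u hu => Or.inl (hcnt''2 u hu)), ?_, ?_, ?_⟩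
      · show missing = (need.length : Int) - (cnt''.size : Int)
        rw [pvSize, hkeys'', ← pvSize, hmiss]
      · intro hcon; exact absurd hmz hcon
      · intro _
        refine ⟨hjex', ⟨u0, hu0, hu0last'⟩, ?_⟩
        show width ≤ ((pre ++ [v]).length : Int) - 1 - (k : Int)
        rw [hlenpre']
        push_cast
        omega
    · -- window incomplete: nothing happens on either side
      have hmz' : ((missing == 0) = true) = False := by
        simp only [beq_iff_eq, eq_iff_iff, iff_false]
        exact hmz
      simp only [hmz', if_false]
      refine ⟨h1, h2, h3, hkeys, htrack2, k, hleft, by omega, hndB, hsubB, hcnt2, hmiss,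
        hm0, ?_⟩
      intro hcon; exact absurd hcon hmz

lemma pvLoop_inv (need : PySem.Set Int) (hnd : need.Nodup) (hne : need ≠ []) (long : List Int) :
    ∀ (rest pre : List Int)
      (stA : PySem.Dict Int Int × Int × (Int × Int))
      (stB : Int × PySem.Dict Int Int × Int × Int × (Int × Int)),
      long = pre ++ rest → pvInv need long pre stA stB →
      pvInv need long (pre ++ rest)
        ((PySem.List.enumerate rest (pre.length : Int)).foldl (pvStepA none) stA)
        ((PySem.List.enumerate rest (pre.length : Int)).foldl (pvStepB need long) stB) := by
  intro rest
  induction rest with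
  | nil =>
      intro pre stA stB _ hInv
      simpa [PySem.List.enumerate_nil] using hInv
  | cons v rest ih =>
      intro pre stA stB hlong hInv
      rw [PySem.List.enumerate_cons]
      simp only [List.foldl_cons]
      have hstep := pvStep_inv need hnd hne long pre rest v hlong stA stB hInv
      have hlong' : long = (pre ++ [v]) ++ rest := by simpa using hlong
      have h2 := ih (pre ++ [v]) _ _ hlong' hstep
      have hcast : ((pre ++ [v]).length : Int) = (pre.length : Int) + 1 := by simp
      rw [hcast] at h2
      have hl : (pre ++ [v]) ++ rest = pre ++ v :: rest := by simp
      rw [hl] at h2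
      exact h2

-- with an empty short, A's loop never fires
lemma pvFoldA_empty (long : List Int) : ∀ (s sh : Int) (res : Int × Int),
    (PySem.List.enumerate long s).foldl (pvStepA none) (PySem.Dict.empty, sh, res)
      = (PySem.Dict.empty, sh, res) := by
  induction long with
  | nil => intro s sh res; simp [PySem.List.enumerate_nil]
  | cons x xs ih =>
      intro s sh res
      rw [PySem.List.enumerate_cons]
      simp only [List.foldl_cons]
      have hstep : pvStepA none (PySem.Dict.empty, sh, res) (s, x) =
          ((PySem.Dict.empty : PySem.Dict Int Int), sh, res) := by
        simp [pvStepA]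
      rw [hstep]
      exact ih _ _ _

-- ===== VERDICT (by name: the statement is the Claim_ definition above) =====
theorem shortest_supersequence_spec : Claim_equal_shortest_supersequence := by
  intro short long _
  unfold Spec_shortest_supersequence
  by_cases hs : short = []
  · subst hs
    simp only [shortest_supersequence, shortest_supersequence_alt, List.foldl_nil]
    rw [pvFoldA_empty long 0 (long.length : Int) (0, (long.length : Int))]
    rfl
  · have hneed : (PySem.Set.ofList short) ≠ [] := by
      obtain ⟨x, t, rfl⟩ := List.exists_cons_of_ne_nil hs
      intro hcon
      have : x ∈ PySem.Set.ofList (x :: t) := (PySem.Set.mem_ofList _ x).2 List.mem_cons_self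
      rw [hcon] at this
      simp at this
    have hnd : (PySem.Set.ofList short).Nodup := PySem.Set.nodup_ofList short
    have hie : (PySem.Set.ofList short).isEmpty = false := by
      rw [List.isEmpty_eq_false_iff_exists_mem]
      obtain ⟨x, t, rfl⟩ := List.exists_cons_of_ne_nil hs
      exact ⟨x, (PySem.Set.mem_ofList _ x).2 List.mem_cons_self⟩
    simp only [shortest_supersequence, shortest_supersequence_alt, hie, Bool.false_eq_true,
      if_false]
    have hinit : pvInv (PySem.Set.ofList short) long []
        (short.foldl (fun d v => d.insert v (-(long.length : Int))) PySem.Dict.empty,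
          (long.length : Int), (0, (long.length : Int)))
        (((PySem.Set.ofList short).length : Int), PySem.Dict.empty, (0 : Int),
          (long.length : Int), ((0 : Int), (long.length : Int))) := by
      refine ⟨rfl, rfl, le_refl _, ?_, ?_, 0, by norm_num, by omega, ?_, ?_, ?_, ?_, ?_, ?_⟩
      · rw [PySem.Dict.keys_foldl_insert (f := fun _ _ => -(long.length : Int))]
        simp [PySem.Dict.keys_empty, PySem.Set.update_nil_left]
      · intro v hv
        rw [pvGetFoldlInsertConst]
        rw [if_pos ((PySem.Set.mem_ofList short v).1 hv)]
        unfold pvLast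
        rfl
      · simp [PySem.Dict.keys_empty]
      · simp [PySem.Dict.keys_empty]
      · intro v _
        exact Or.inr ⟨PySem.Dict.get?_empty v, by simp⟩
      · rw [PySem.Dict.size_empty]
        norm_num
      · intro _; rfl
      · intro hcon
        exfalso
        have hcon' : ((PySem.Set.ofList short).length : Int) = 0 := hcon
        have : (PySem.Set.ofList short).length ≠ 0 := by
          intro h
          exact hneed (List.eq_nil_of_length_eq_zero h)
        omega
    have hfin := pvLoop_inv (PySem.Set.ofList short) hnd hneed long long [] _ _ (by simp) hinit
    simp only [List.length_nil, Nat.cast_zero, List.nil_append] at hfin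
    obtain ⟨-, hres, -⟩ := hfin
    rw [hres]
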